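-- pv_equiv track=rewrite | github.com/asaran/ICML2019-TREX | atari/utils.py | SkipGazeCoords
-- ===== SOURCE A (Python) =====
-- def SkipGazeCoords(gaze_coords):
--     """take a list of gaze coordinates and uses every 3rd and 4th observation"""
--     num_frames = len(gaze_coords)
--     skip=4
--
--     skipped_frames = []
--     obs_buffer = []
--     for i in range(num_frames):
--         g = gaze_coords[i]
--
--         if i % skip == skip - 2:
--             obs_buffer.append(g)
--         if i % skip == skip - 1:
--             obs_buffer.append(g)
--             skipped_frames.append(obs_buffer)
--             obs_buffer = []
--
--     return skipped_frames
-- ===== SOURCE B (Python) =====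
-- def SkipGazeCoords(gaze_coords):
--     """take a list of gaze coordinates and uses every 3rd and 4th observation"""
--     even = gaze_coords[2::4]
--     odd = gaze_coords[3::4]
--     return [[a, b] for a, b in zip(even, odd)]
-- ===== Notes on version B (the rewrite author's own statement) =====
-- stated objective: idiomatic
-- what changed: Replaces the indexed loop with modulo tests and a mutable pair buffer by two strided slices [2::4] and [3::4] zipped into pairs; zip's truncation replaces the dropped partial buffer.
import Mathlib
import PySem

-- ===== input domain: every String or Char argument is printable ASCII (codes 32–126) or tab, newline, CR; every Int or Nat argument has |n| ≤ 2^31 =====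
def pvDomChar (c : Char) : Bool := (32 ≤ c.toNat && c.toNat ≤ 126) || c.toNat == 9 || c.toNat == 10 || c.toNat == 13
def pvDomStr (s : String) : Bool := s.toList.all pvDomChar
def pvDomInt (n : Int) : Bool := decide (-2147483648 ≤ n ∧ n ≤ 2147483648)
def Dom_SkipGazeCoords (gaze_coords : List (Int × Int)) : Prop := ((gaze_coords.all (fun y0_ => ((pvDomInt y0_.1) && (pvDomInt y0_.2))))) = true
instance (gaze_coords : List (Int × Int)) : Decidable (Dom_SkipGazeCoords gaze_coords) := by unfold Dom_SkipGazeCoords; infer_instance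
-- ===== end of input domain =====

-- B replaces A's indexed modulo loop with a mutable pair buffer by two strided slices [2::4] and
-- [3::4] zipped into pairs (same O(n) cost; idiomatic decomposition, no buffer state).


-- ===== PORT A =====
def SkipGazeCoords (gaze_coords : List (Int × Int)) : List (List (Int × Int)) :=
  let num_frames := gaze_coords.length
  let skip : Int := 4
  let st := (PySem.List.pyRange 0 num_frames 1).foldl
    (fun (st : List (List (Int × Int)) × List (Int × Int)) i =>
      let g := PySem.List.pyGetD gaze_coords i (0, 0)
      let obs_buffer := if PySem.Int.mod i skip = skip - 2 then st.2 ++ [g] else st.2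
      if PySem.Int.mod i skip = skip - 1 then (st.1 ++ [obs_buffer ++ [g]], [])
      else (st.1, obs_buffer))
    ([], [])
  st.1

-- ===== PORT B =====
def SkipGazeCoords_alt (gaze_coords : List (Int × Int)) : List (List (Int × Int)) :=
  let even := (PySem.List.slice? gaze_coords (some 2) none 4).getD []
  let odd := (PySem.List.slice? gaze_coords (some 3) none 4).getD []
  (even.zip odd).map (fun p => [p.1, p.2])

-- ===== PRECONDITION & SPEC =====
def Spec_SkipGazeCoords (gaze_coords : List (Int × Int)) (out : List (List (Int × Int))) : Prop := out = SkipGazeCoords_alt gaze_coords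
instance (gaze_coords : List (Int × Int)) (out : List (List (Int × Int))) : Decidable (Spec_SkipGazeCoords gaze_coords out) := by unfold Spec_SkipGazeCoords; infer_instance

-- ===== CLAIM (what is proved, stated in full; the proofs are below) =====
def Claim_equal_SkipGazeCoords : Prop := ∀ (gaze_coords : List (Int × Int)), Dom_SkipGazeCoords gaze_coords → Spec_SkipGazeCoords gaze_coords (SkipGazeCoords gaze_coords)

-- ===== LEMMAS AND PROOFS =====

-- A's loop body, named for the proofs (definitionally the lambda inside SkipGazeCoords).
def fA (xs : List (Int × Int)) (st : List (List (Int × Int)) × List (Int × Int)) (i : Int) :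
    List (List (Int × Int)) × List (Int × Int) :=
  let g := PySem.List.pyGetD xs i (0, 0)
  let obs_buffer := if PySem.Int.mod i 4 = 4 - 2 then st.2 ++ [g] else st.2
  if PySem.Int.mod i 4 = 4 - 1 then (st.1 ++ [obs_buffer ++ [g]], []) else (st.1, obs_buffer)

lemma skip_eq (xs : List (Int × Int)) :
    SkipGazeCoords xs = (List.foldl (fA xs) ([], []) (PySem.List.pyRange 0 xs.length 1)).1 := rfl

-- the common value both programs compute: one [c, d] pair from every aligned block of four
def pairs4 : List (Int × Int) → List (List (Int × Int))
  | [] => []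
  | [_] => []
  | [_, _] => []
  | [_, _, _] => []
  | _ :: _ :: c :: d :: rest => [c, d] :: pairs4 rest
termination_by xs => xs.length
decreasing_by simp only [List.length_cons]; omega

lemma eA0 (xs : List (Int × Int)) (st : List (List (Int × Int)) × List (Int × Int)) :
    fA xs st (((0 : Nat) : Int)) = st := by
  simp only [fA]
  rw [if_neg (by decide), if_neg (by decide)]

lemma eA1 (xs : List (Int × Int)) (st : List (List (Int × Int)) × List (Int × Int)) :
    fA xs st (((1 : Nat) : Int)) = st := by
  simp only [fA]
  rw [if_neg (by decide), if_neg (by decide)]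

lemma eA2 (xs : List (Int × Int)) (st : List (List (Int × Int)) × List (Int × Int)) :
    fA xs st (((2 : Nat) : Int)) = (st.1, st.2 ++ [PySem.List.pyGetD xs ((2 : Nat) : Int) (0, 0)]) := by
  simp only [fA]
  rw [if_neg (by decide), if_pos (by decide)]

lemma eA3 (xs : List (Int × Int)) (st : List (List (Int × Int)) × List (Int × Int)) :
    fA xs st (((3 : Nat) : Int))
      = (st.1 ++ [st.2 ++ [PySem.List.pyGetD xs ((3 : Nat) : Int) (0, 0)]], []) := by
  simp only [fA]
  rw [if_pos (by decide), if_neg (by decide)]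

lemma fA_step (xs : List (Int × Int)) (acc : List (List (Int × Int))) (b : List (Int × Int)) (i : Int) :
    fA xs (acc, b) i = (acc ++ (fA xs ([], b) i).1, (fA xs ([], b) i).2) := by
  simp only [fA]
  split_ifs <;> simp

lemma fA_shift (xs : List (Int × Int)) (l : List Int) :
    ∀ acc b, List.foldl (fA xs) (acc, b) l
      = (acc ++ (List.foldl (fA xs) ([], b) l).1, (List.foldl (fA xs) ([], b) l).2) := by
  induction l with
  | nil => intro acc b; simp
  | cons i l ih =>
    intro acc b
    simp only [List.foldl_cons]
    rw [fA_step, ih, ih (fA xs ([], b) i).1 (fA xs ([], b) i).2]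
    simp

lemma fA_shift4 (a b c d : Int × Int) (rest : List (Int × Int))
    (st : List (List (Int × Int)) × List (Int × Int)) (k : Nat) :
    fA (a :: b :: c :: d :: rest) st ((4 + k : Nat) : Int) = fA rest st (k : Int) := by
  have hm : PySem.Int.mod ((4 + k : Nat) : Int) 4 = PySem.Int.mod (k : Int) 4 := by
    have h4 : (4 : Int) = ((4 : Nat) : Int) := rfl
    rw [h4, PySem.Int.mod_natCast, PySem.Int.mod_natCast]
    congr 1
    omega
  have hg : PySem.List.pyGetD (a :: b :: c :: d :: rest) ((4 + k : Nat) : Int) (0, 0)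
      = PySem.List.pyGetD rest (k : Int) (0, 0) := by
    rw [PySem.List.pyGetD_natCast, PySem.List.pyGetD_natCast,
      (by omega : (4 + k : Nat) = k + 4)]
    rfl
  simp only [fA, hm, hg]

theorem Achar : (xs : List (Int × Int)) → SkipGazeCoords xs = pairs4 xs
  | [] => by
    rw [skip_eq, pairs4, PySem.List.pyRange_zero_natCast,
      show List.range (List.length ([] : List (Int × Int))) = [] from rfl]
    rfl
  | [a] => by
    rw [skip_eq, pairs4, PySem.List.pyRange_zero_natCast,
      show List.range ([a].length) = [0] from rfl]
    simp only [List.map_cons, List.map_nil, List.foldl_cons, List.foldl_nil, eA0]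
  | [a, b] => by
    rw [skip_eq, pairs4, PySem.List.pyRange_zero_natCast,
      show List.range ([a, b].length) = [0, 1] from rfl]
    simp only [List.map_cons, List.map_nil, List.foldl_cons, List.foldl_nil, eA0, eA1]
  | [a, b, c] => by
    rw [skip_eq, pairs4, PySem.List.pyRange_zero_natCast,
      show List.range ([a, b, c].length) = [0, 1, 2] from rfl]
    simp only [List.map_cons, List.map_nil, List.foldl_cons, List.foldl_nil, eA0, eA1, eA2]
  | a :: b :: c :: d :: rest => by
    rw [skip_eq, pairs4]
    have hlen : (a :: b :: c :: d :: rest).length = 4 + rest.length := by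
      simp only [List.length_cons]
      omega
    rw [hlen, PySem.List.pyRange_zero_natCast, List.range_add, List.map_append, List.foldl_append]
    have h4 : List.foldl (fA (a :: b :: c :: d :: rest))
        (([], []) : List (List (Int × Int)) × List (Int × Int))
        (List.map (fun k : Nat => (k : Int)) (List.range 4)) = ([[c, d]], []) := by
      rw [show List.range 4 = [0, 1, 2, 3] from rfl]
      simp only [List.map_cons, List.map_nil, List.foldl_cons, List.foldl_nil, eA0, eA1, eA2, eA3]
      rw [PySem.List.pyGetD_natCast, PySem.List.pyGetD_natCast]
      rfl
    rw [h4, List.map_map]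
    have hcomp : ((fun k : Nat => (k : Int)) ∘ (fun x : Nat => 4 + x))
        = (fun k : Nat => ((4 + k : Nat) : Int)) := rfl
    rw [hcomp, List.foldl_map]
    have hfun : (fun (st : List (List (Int × Int)) × List (Int × Int)) (k : Nat) =>
          fA (a :: b :: c :: d :: rest) st ((4 + k : Nat) : Int))
        = (fun st (k : Nat) => fA rest st (k : Int)) := by
      funext st k
      exact fA_shift4 a b c d rest st k
    rw [hfun, ← List.foldl_map (f := fun k : Nat => (k : Int)) (g := fA rest), fA_shift]
    have : SkipGazeCoords rest = pairs4 rest := Achar rest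
    rw [skip_eq, PySem.List.pyRange_zero_natCast] at this
    simp [this]
termination_by xs => xs.length
decreasing_by simp only [List.length_cons]; omega

-- every 4th element of xs starting at its head (what a step-4 slice collects)
def stride4 {α : Type} : List α → List α
  | [] => []
  | x :: rest => x :: stride4 (rest.drop 3)
termination_by xs => xs.length
decreasing_by simp

lemma slice_closed {α : Type} (xs : List α) (a : Nat) :
    (PySem.List.slice? xs (some (a:Int)) none 4).getD []
      = List.filterMap (fun k => xs[(a + 4*k : Nat)]?) (List.range ((xs.length - a + 3)/4)) := by
  simp only [PySem.List.slice?, PySem.List.sliceIndices]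
  norm_num
  have h0 : ¬((a:Int) < 0) := by omega
  simp only [if_neg h0]
  rcases Nat.lt_or_ge a xs.length with h | h
  · rw [(by omega : min (a:Int) (xs.length:Int) = (a:Int)),
      if_pos (by omega : (a:Int) < (xs.length:Int)),
      (by omega : (((xs.length:Int) - a + 4 - 1) / 4).toNat = (xs.length - a + 3)/4)]
    apply List.filterMap_congr
    intro x _
    rw [(by omega : ((a:Int) + 4 * (x:Int)).toNat = a + 4*x)]
  · rw [(by omega : min (a:Int) (xs.length:Int) = (xs.length:Int)),
      if_neg (by omega : ¬ ((xs.length:Int) < (xs.length:Int))),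
      (by omega : (xs.length - a + 3)/4 = 0)]
    simp

lemma fm_stride {α : Type} (m : Nat) : ∀ (xs : List α) (a : Nat), xs.length ≤ a + m →
    List.filterMap (fun k => xs[(a + 4*k : Nat)]?) (List.range ((xs.length - a + 3)/4))
      = stride4 (xs.drop a) := by
  induction m with
  | zero =>
    intro xs a h
    rw [(by omega : (xs.length - a + 3)/4 = 0), List.drop_eq_nil_of_le (by omega)]
    rw [stride4]
    simp
  | succ m ih =>
    intro xs a h
    rcases Nat.lt_or_ge a xs.length with hlt | hge
    · have hc : (xs.length - a + 3)/4 = (xs.length - (a+4) + 3)/4 + 1 := by omega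
      rw [hc, List.range_succ_eq_map, List.filterMap_cons]
      have h0 : xs[(a + 4*0 : Nat)]? = some xs[a] := by
        simp [hlt]
      rw [h0, List.filterMap_map]
      have hfun : ((fun k => xs[(a + 4*k : Nat)]?) ∘ Nat.succ) = (fun k => xs[(a + 4 + 4*k : Nat)]?) := by
        funext k
        simp only [Function.comp]
        congr 1
        omega
      rw [hfun, ih xs (a+4) (by omega)]
      rw [List.drop_eq_getElem_cons hlt]
      rw [stride4, List.drop_drop]
    · rw [(by omega : (xs.length - a + 3)/4 = 0), List.drop_eq_nil_of_le (by omega)]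
      rw [stride4]
      simp

theorem zip_pairs : (xs : List (Int × Int)) →
    ((stride4 (xs.drop 2)).zip (stride4 (xs.drop 3))).map (fun p => [p.1, p.2]) = pairs4 xs
  | [] => by simp [stride4, pairs4]
  | [a] => by simp [stride4, pairs4]
  | [a, b] => by simp [stride4, pairs4]
  | [a, b, c] => by simp [stride4, pairs4]
  | a :: b :: c :: d :: rest => by
    rw [pairs4, show ((a :: b :: c :: d :: rest).drop 2) = c :: d :: rest from rfl,
      show ((a :: b :: c :: d :: rest).drop 3) = d :: rest from rfl,
      stride4, stride4,
      show ((d :: rest).drop 3) = rest.drop 2 from rfl]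
    simp only [List.zip_cons_cons, List.map_cons]
    rw [zip_pairs rest]
termination_by xs => xs.length
decreasing_by simp only [List.length_cons]; omega

lemma Bchar (xs : List (Int × Int)) : SkipGazeCoords_alt xs = pairs4 xs := by
  show ((((PySem.List.slice? xs (some 2) none 4).getD []).zip
      ((PySem.List.slice? xs (some 3) none 4).getD [])).map (fun p => [p.1, p.2])) = pairs4 xs
  rw [show ((2 : Int)) = ((2 : Nat) : Int) from rfl, show ((3 : Int)) = ((3 : Nat) : Int) from rfl,
    slice_closed xs 2, slice_closed xs 3,
    fm_stride xs.length xs 2 (by omega), fm_stride xs.length xs 3 (by omega),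
    zip_pairs xs]

-- ===== VERDICT (by name: the statement is the Claim_ definition above) =====
theorem SkipGazeCoords_spec : Claim_equal_SkipGazeCoords := by
  intro xs _
  show SkipGazeCoords xs = SkipGazeCoords_alt xs
  rw [Achar xs, Bchar xs]
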